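-- pv_equiv track=rewrite | github.com/BychkovArthur/algorithms | yandex-algorithm-training-1.0/contest-5/test_h.py | solution
-- ===== SOURCE A (Python) =====
-- from collections import defaultdict
--
-- def solution(stirng, n, k):
--     left = 0
--     right = 0
--     current_nums = defaultdict(int)
--     current_nums[stirng[0]] = 1
--     max_len = 1
--     ans_left = 1
--     while True:
--         if right - left + 1 > max_len:
--             max_len = right - left + 1
--             ans_left = left + 1
--         if right < n - 1 and current_nums[stirng[right + 1]] < k:
--             right += 1
--             current_nums[stirng[right]] += 1
--         elif left < right:
--             current_nums[stirng[left]] -= 1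
--             left += 1
--         else:
--             break
--
--
--     return max_len, ans_left
-- ===== SOURCE B (Python) =====
-- def solution(stirng, n, k):
--     # Independent per-start scans: for each start l, grow a fresh window while
--     # every character count stays <= k; keep the first start with the strictly
--     # largest window.  (A uses a single two-pointer sweep instead.)
--     best_len, ans_left = 1, 1
--     for l in range(n):
--         cnt = {}
--         cnt[stirng[l]] = 1
--         j = l
--         while j < n - 1 and cnt.get(stirng[j + 1], 0) < k:
--             j += 1
--             cnt[stirng[j]] = cnt.get(stirng[j], 0) + 1
--         if j - l + 1 > best_len:
--             best_len, ans_left = j - l + 1, l + 1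
--     return best_len, ans_left
-- ===== Notes on version B (the rewrite author's own statement) =====
-- stated objective: alternative
-- what changed: Replaced A's single monotone two-pointer sweep (one shared sliding count table) by independent per-start scans: for each start l a fresh count table is built and the window is extended greedily, keeping the first start with a strictly larger window.
-- intended difference: When k == 1 and the first n characters contain an adjacent duplicate pair, A's loop breaks at the first such pair and misses any strictly longer duplicate-free window starting after it (e.g. 'aab', 3, 1: A returns (1, 1)), while B scans every start and returns that longest window ((2, 2)), which is the intended answer to the longest-valid-substring task; the programs differ exactly when such a later longer window exists. — e.g. on solution("aab", 3, 1): A returns (1, 1), B returns (2, 2)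
-- outside the precondition, e.g. on solution('aa', 5, 1): A returns (1, 1), B raises IndexError
import Mathlib
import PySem

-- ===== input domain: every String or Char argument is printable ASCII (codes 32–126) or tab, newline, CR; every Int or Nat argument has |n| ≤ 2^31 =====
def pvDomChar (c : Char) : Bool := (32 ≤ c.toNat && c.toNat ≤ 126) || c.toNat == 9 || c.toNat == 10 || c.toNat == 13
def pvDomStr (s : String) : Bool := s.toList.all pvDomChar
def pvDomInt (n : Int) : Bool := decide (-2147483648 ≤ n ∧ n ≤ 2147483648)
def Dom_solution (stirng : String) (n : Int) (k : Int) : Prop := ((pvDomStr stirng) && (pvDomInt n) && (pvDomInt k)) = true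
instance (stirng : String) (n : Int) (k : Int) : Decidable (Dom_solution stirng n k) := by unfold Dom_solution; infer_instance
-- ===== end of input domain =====

-- B replaces A's single two-pointer sweep by independent per-start window scans (same cost class
-- not claimed: B is quadratic); on k = 1 inputs whose first n characters contain an adjacent
-- duplicate pair, A's loop breaks early and B returns the intended longest window (see D_solution).

-- ===== PORT A =====
def aGet (t : List Char) (i : Int) : Char := (PySem.List.pyGet? t i).getD ' '

-- A's 'while True' loop; fuel 2*n.toNat+2 strictly exceeds the number of iterations the loop
-- can make from the initial state (each step increases left+right, 0 ≤ left ≤ right ≤ n-1).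
def aLoop (t : List Char) (n k : Int) : Nat → Int → Int → PySem.Dict Char Int → Int → Int → Int × Int
  | 0, _, _, _, maxLen, ansLeft => (maxLen, ansLeft)
  | fuel + 1, left, right, cnt, maxLen, ansLeft =>
    let maxLen' := if right - left + 1 > maxLen then right - left + 1 else maxLen
    let ansLeft' := if right - left + 1 > maxLen then left + 1 else ansLeft
    if right < n - 1 ∧ cnt.getD (aGet t (right + 1)) 0 < k then
      aLoop t n k fuel left (right + 1)
        (cnt.insert (aGet t (right + 1)) (cnt.getD (aGet t (right + 1)) 0 + 1)) maxLen' ansLeft'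
    else if left < right then
      aLoop t n k fuel (left + 1) right
        (cnt.insert (aGet t left) (cnt.getD (aGet t left) 0 - 1)) maxLen' ansLeft'
    else
      (maxLen', ansLeft')

def solution (stirng : String) (n : Int) (k : Int) : Int × Int :=
  aLoop stirng.toList n k (2 * n.toNat + 2) 0 0
    (PySem.Dict.insert PySem.Dict.empty (aGet stirng.toList 0) 1) 1 1

-- ===== PORT B =====
def bGet (t : List Char) (i : Int) : Char := (PySem.List.pyGet? t i).getD ' '

-- Source B's inner 'while' loop: extend the window end j while the next character keeps its count < k;
-- fuel n.toNat strictly bounds the iteration count (j starts at l ≥ 0 and stays < n - 1).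
def bExtend (t : List Char) (n k : Int) : Nat → Int → PySem.Dict Char Int → Int
  | 0, j, _ => j
  | fuel + 1, j, cnt =>
    if j < n - 1 ∧ cnt.getD (bGet t (j + 1)) 0 < k then
      bExtend t n k fuel (j + 1) (cnt.insert (bGet t (j + 1)) (cnt.getD (bGet t (j + 1)) 0 + 1))
    else j

def solution_alt (stirng : String) (n : Int) (k : Int) : Int × Int :=
  (PySem.List.pyRange 0 n 1).foldl
    (fun b l =>
      let j := bExtend stirng.toList n k n.toNat l
        (PySem.Dict.insert PySem.Dict.empty (bGet stirng.toList l) 1)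
      if j - l + 1 > b.1 then (j - l + 1, l + 1) else b)
    (1, 1)

-- ===== PRECONDITION & SPEC =====
-- Pre_ excludes exactly the inputs where A raises IndexError: the empty string (A reads stirng[0]
-- unconditionally) and n > len(stirng) (A may index past the end; on some such inputs — e.g.
-- ("aa", 5, 1), where its loop gets stuck before reaching the end — A still returns, but there the
-- bound n is inconsistent with the string and B raises IndexError, so those inputs are excluded).
def Pre_solution (stirng : String) (n : Int) (k : Int) : Prop :=
  stirng.toList ≠ [] ∧ n ≤ (stirng.toList.length : Int)
instance (stirng : String) (n : Int) (k : Int) : Decidable (Pre_solution stirng n k) := by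
  unfold Pre_solution; infer_instance
def pvWitness_solution : String × Int × Int := ("ab", 2, 2)

-- When k = 1 and the first n characters contain an adjacent duplicate pair, A's loop breaks at the
-- first such pair and returns the best window seen up to it, while B returns the genuinely longest
-- duplicate-free window (earliest on ties) — the intended answer; they differ exactly when a
-- strictly longer duplicate-free window starts after that first pair.
-- dDup s q: positions q and q+1 of s hold the same character
def dDup (stirng : String) (q : Nat) : Prop :=
  stirng.toList.getD q ' ' = stirng.toList.getD (q + 1) ' '
-- dOk s n l r: s[l..r] is a window of the first n characters with no repeated character
def dOk (stirng : String) (n : Int) (l r : Nat) : Prop :=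
  l ≤ r ∧ r < n.toNat ∧ ((stirng.toList.drop l).take (r + 1 - l)).Nodup
def D_solution (stirng : String) (n : Int) (k : Int) : Prop :=
  k = 1 ∧
  ∃ l r, dOk stirng n l r ∧
    ∀ l' r', dOk stirng n l' r' → (∀ q < l', ¬ dDup stirng q) → r' - l' < r - l
instance (stirng : String) (n : Int) (k : Int) : Decidable (D_solution stirng n k) := by
  unfold D_solution dOk dDup
  refine decidable_of_iff (k = 1 ∧
    ∃ l ∈ List.range n.toNat, ∃ r ∈ List.range n.toNat,
      (l ≤ r ∧ r < n.toNat ∧ ((stirng.toList.drop l).take (r + 1 - l)).Nodup) ∧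
      ∀ l' ∈ List.range n.toNat, ∀ r' ∈ List.range n.toNat,
        ((l' ≤ r' ∧ r' < n.toNat ∧ ((stirng.toList.drop l').take (r' + 1 - l')).Nodup) ∧
          ∀ q ∈ List.range l', ¬ stirng.toList.getD q ' ' = stirng.toList.getD (q + 1) ' ') →
        r' - l' < r - l) ?_
  constructor
  · rintro ⟨hk, l, hlmem, r, hrmem, hok, hall⟩
    refine ⟨hk, l, r, hok, ?_⟩
    rintro l' r' hok' hfirst'
    exact hall l' (List.mem_range.mpr (by omega)) r' (List.mem_range.mpr hok'.2.1)
      ⟨hok', fun q hq => hfirst' q (List.mem_range.mp hq)⟩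
  · rintro ⟨hk, l, r, hok, hall⟩
    refine ⟨hk, l, List.mem_range.mpr (by omega), r, List.mem_range.mpr hok.2.1, hok, ?_⟩
    rintro l' hl'mem r' hr'mem ⟨hok', hfirst'⟩
    exact hall l' r' hok' (fun q hq => hfirst' q (List.mem_range.mpr hq))

def Spec_solution (stirng : String) (n : Int) (k : Int) (out : Int × Int) : Prop :=
  ¬ D_solution stirng n k → out = solution_alt stirng n k
instance (stirng : String) (n : Int) (k : Int) (out : Int × Int) : Decidable (Spec_solution stirng n k out) := by
  unfold Spec_solution; infer_instance

def pvDiffWitness_solution : String × Int × Int := ("aab", 3, 1)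
def pvDiffWitnessOut_solution : (Int × Int) × (Int × Int) := ((1, 1), (2, 2))

-- ===== CLAIM (what is proved, stated in full; the proofs are below) =====
def Claim_unchanged_solution : Prop := ∀ (stirng : String) (n : Int) (k : Int), Dom_solution stirng n k → Pre_solution stirng n k → Spec_solution stirng n k (solution stirng n k)
def Claim_changed_solution : Prop := Dom_solution (pvDiffWitness_solution.1) (pvDiffWitness_solution.2.1) (pvDiffWitness_solution.2.2) ∧ Pre_solution (pvDiffWitness_solution.1) (pvDiffWitness_solution.2.1) (pvDiffWitness_solution.2.2) ∧ D_solution (pvDiffWitness_solution.1) (pvDiffWitness_solution.2.1) (pvDiffWitness_solution.2.2) ∧ solution (pvDiffWitness_solution.1) (pvDiffWitness_solution.2.1) (pvDiffWitness_solution.2.2) = pvDiffWitnessOut_solution.1 ∧ solution_alt (pvDiffWitness_solution.1) (pvDiffWitness_solution.2.1) (pvDiffWitness_solution.2.2) = pvDiffWitnessOut_solution.2 ∧ pvDiffWitnessOut_solution.1 ≠ pvDiffWitnessOut_solution.2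
def Claim_exact_solution : Prop := ∀ (stirng : String) (n : Int) (k : Int), Dom_solution stirng n k → Pre_solution stirng n k → D_solution stirng n k → solution stirng n k ≠ solution_alt stirng n k

-- ===== LEMMAS AND PROOFS =====

-- window t[l..r] (inclusive ends), as a list of characters
def dWin (t : List Char) (l r : Nat) : List Char := (t.drop l).take (r + 1 - l)

-- window character count
def pwCw (t : List Char) (l r : Nat) (c : Char) : Nat := (dWin t l r).count c

-- best-so-far update, exactly the ports' conditional
def pwUpd (b : Int × Int) (len pos : Int) : Int × Int := if len > b.1 then (len, pos) else b

-- reference extension: the largest window end reachable from start l, arriving at j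
def pwE (t : List Char) (N : Nat) (k : Int) (l j : Nat) : Nat :=
  if j + 1 < N ∧ ((pwCw t l j (t.getD (j + 1) ' ') : Int) < k) then pwE t N k l (j + 1) else j
termination_by N - j
decreasing_by omega

def pwLen (t : List Char) (N : Nat) (k : Int) (l : Nat) : Int := (pwE t N k l l : Int) - l + 1

def pwStep (t : List Char) (N : Nat) (k : Int) (b : Int × Int) (l : Nat) : Int × Int :=
  pwUpd b (pwLen t N k l) ((l : Int) + 1)

theorem pwE_ge (t : List Char) (N : Nat) (k : Int) (l j : Nat) : j ≤ pwE t N k l j := by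
  by_cases h : j + 1 < N ∧ ((pwCw t l j (t.getD (j + 1) ' ') : Int) < k)
  · rw [pwE, if_pos h]
    have := pwE_ge t N k l (j + 1)
    omega
  · rw [pwE, if_neg h]
termination_by N - j
decreasing_by omega

theorem pwE_stuck (t : List Char) (N : Nat) (k : Int) (l j : Nat) (h : N ≤ j + 1) :
    pwE t N k l j = j := by
  rw [pwE, if_neg]
  rintro ⟨h1, -⟩; omega

theorem pwE_lt (t : List Char) (N : Nat) (k : Int) (l j : Nat) (h : j < N) :
    pwE t N k l j < N := by
  by_cases hc : j + 1 < N ∧ ((pwCw t l j (t.getD (j + 1) ' ') : Int) < k)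
  · rw [pwE, if_pos hc]
    exact pwE_lt t N k l (j + 1) hc.1
  · rw [pwE, if_neg hc]; exact h
termination_by N - j
decreasing_by omega

-- A's best-so-far fold along the starts its two-pointer visits
def pwAFold (t : List Char) (N : Nat) (k : Int) (l : Nat) (b : Int × Int) : Int × Int :=
  let e := pwE t N k l l
  let b' := pwUpd b ((e : Int) - l + 1) ((l : Int) + 1)
  if h : l < e then pwAFold t N k (l + 1) b' else b'
termination_by N - l
decreasing_by
  have h1 := pwE_lt t N k l l
  by_cases hN : l < N
  · have := h1 hN; omega
  · have := pwE_stuck t N k l l (by omega); omega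

-- the count dictionary holds exactly the character counts of window [l..r]
def pwInv (t : List Char) (cnt : PySem.Dict Char Int) (l r : Nat) : Prop :=
  ∀ c : Char, cnt.getD c 0 = ((dWin t l r).count c : Int)

theorem dWin_single (t : List Char) (l : Nat) (h : l < t.length) :
    dWin t l l = [t.getD l ' '] := by
  simp [dWin, List.take_one, List.head?_drop, List.getElem?_eq_getElem h]

theorem dWin_snoc (t : List Char) (l j : Nat) (hl : l ≤ j + 1) (hj : j + 1 < t.length) :
    dWin t l (j + 1) = dWin t l j ++ [t.getD (j + 1) ' '] := by
  have h1 : j + 1 + 1 - l = (j + 1 - l) + 1 := by omega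
  rw [dWin, h1, List.take_add_one, dWin]
  congr 1
  rw [List.getElem?_drop]
  have h2 : l + (j + 1 - l) = j + 1 := by omega
  rw [h2, List.getElem?_eq_getElem hj, List.getD_eq_getElem t ' ' hj]
  rfl

theorem dWin_cons (t : List Char) (l r : Nat) (hl : l ≤ r) (h : l < t.length) :
    dWin t l r = t.getD l ' ' :: dWin t (l + 1) r := by
  rw [dWin, List.drop_eq_getElem_cons h]
  have h1 : r + 1 - l = (r - l) + 1 := by omega
  have h2 : r + 1 - (l + 1) = r - l := by omega
  rw [h1, List.take_succ_cons, dWin, h2, List.getD_eq_getElem t ' ' h]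

theorem pwGet_eq (t : List Char) (i : Int) (h : 0 ≤ i) :
    (PySem.List.pyGet? t i).getD ' ' = t.getD i.toNat ' ' := by
  rw [PySem.List.pyGet?_of_nonneg t h, List.getD_eq_getElem?_getD]

theorem pwCw_single (t : List Char) (l : Nat) (c : Char) (h : l < t.length) :
    pwCw t l l c = if t.getD l ' ' = c then 1 else 0 := by
  rw [pwCw, dWin_single t l h]
  simp [List.count_singleton]

theorem pwCw_snoc (t : List Char) (l j : Nat) (c : Char) (hl : l ≤ j + 1) (hj : j + 1 < t.length) :
    pwCw t l (j + 1) c = pwCw t l j c + (if t.getD (j + 1) ' ' = c then 1 else 0) := by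
  rw [pwCw, dWin_snoc t l j hl hj, List.count_append, pwCw]
  simp [List.count_singleton]

theorem pwCw_cons (t : List Char) (l r : Nat) (c : Char) (hl : l ≤ r) (h : l < t.length) :
    pwCw t l r c = pwCw t (l + 1) r c + (if t.getD l ' ' = c then 1 else 0) := by
  rw [pwCw, dWin_cons t l r hl h, List.count_cons, pwCw]
  simp

theorem pwE_step (t : List Char) (N : Nat) (k : Int) (l j : Nat)
    (hc : j + 1 < N ∧ ((pwCw t l j (t.getD (j + 1) ' ') : Int) < k)) :
    pwE t N k l j = pwE t N k l (j + 1) := by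
  rw [pwE, if_pos hc]

theorem pwE_halt (t : List Char) (N : Nat) (k : Int) (l j : Nat)
    (hc : ¬ (j + 1 < N ∧ ((pwCw t l j (t.getD (j + 1) ' ') : Int) < k))) :
    pwE t N k l j = j := by
  rw [pwE, if_neg hc]

theorem pwE_agree (t : List Char) (N : Nat) (k : Int) (l j j' : Nat)
    (h1 : j ≤ j') (h2 : j' ≤ pwE t N k l j) : pwE t N k l j' = pwE t N k l j := by
  by_cases hc : j + 1 < N ∧ ((pwCw t l j (t.getD (j + 1) ' ') : Int) < k)
  · rcases Nat.eq_or_lt_of_le h1 with he | hlt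
    · rw [he]
    · rw [pwE_step t N k l j hc] at h2 ⊢
      exact pwE_agree t N k l (j + 1) j' hlt h2
  · rw [pwE_halt t N k l j hc] at h2
    have he : j' = j := le_antisymm h2 h1
    rw [he]
termination_by N - j
decreasing_by omega

theorem pwE_mono (t : List Char) (N : Nat) (k : Int) (l : Nat) (hlen : N ≤ t.length)
    (j : Nat) (hj : l + 1 ≤ j) : pwE t N k l j ≤ pwE t N k (l + 1) j := by
  by_cases hc : j + 1 < N ∧ ((pwCw t l j (t.getD (j + 1) ' ') : Int) < k)
  · have hlt : l < t.length := by omega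
    have hcw : pwCw t (l + 1) j (t.getD (j + 1) ' ') ≤ pwCw t l j (t.getD (j + 1) ' ') := by
      have h := pwCw_cons t l j (t.getD (j + 1) ' ') (by omega) hlt
      split_ifs at h <;> omega
    have hc' : j + 1 < N ∧ ((pwCw t (l + 1) j (t.getD (j + 1) ' ') : Int) < k) :=
      ⟨hc.1, lt_of_le_of_lt (by exact_mod_cast hcw) hc.2⟩
    rw [pwE_step t N k l j hc, pwE_step t N k (l + 1) j hc']
    exact pwE_mono t N k l hlen (j + 1) (by omega)
  · rw [pwE_halt t N k l j hc]
    exact pwE_ge t N k (l + 1) j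
termination_by N - j
decreasing_by omega

theorem pwUpd_fst (b : Int × Int) (len pos : Int) :
    b.1 ≤ (pwUpd b len pos).1 ∧ len ≤ (pwUpd b len pos).1 := by
  unfold pwUpd; split_ifs with h
  · exact ⟨le_of_lt h, le_rfl⟩
  · exact ⟨le_rfl, by omega⟩

theorem pwUpd_chain (b : Int × Int) (l1 l2 pos : Int) (h : l1 ≤ l2) :
    pwUpd (pwUpd b l1 pos) l2 pos = pwUpd b l2 pos := by
  unfold pwUpd
  split_ifs with h1 h2 h3 h4 <;> simp_all <;> omega

theorem pwUpd_noop (b : Int × Int) (len pos : Int) (h : len ≤ b.1) : pwUpd b len pos = b := by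
  unfold pwUpd; rw [if_neg]; omega

theorem bExtend_eq_pwE (t : List Char) (n k : Int) (hlen : n ≤ (t.length : Int)) :
    ∀ (fuel : Nat) (l j : Nat) (cnt : PySem.Dict Char Int),
      pwInv t cnt l j → l ≤ j → n.toNat ≤ fuel + j + 1 →
      bExtend t n k fuel (j : Int) cnt = (pwE t n.toNat k l j : Int) := by
  intro fuel
  induction fuel with
  | zero =>
    intro l j cnt hinv hlj hfuel
    rw [pwE_stuck t n.toNat k l j (by omega)]
    simp [bExtend]
  | succ fuel ih =>
    intro l j cnt hinv hlj hfuel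
    have hget : bGet t ((j : Int) + 1) = t.getD (j + 1) ' ' := by
      have h := pwGet_eq t ((j : Int) + 1) (by omega)
      rw [bGet, h]
      norm_num
    have hcnt := hinv (t.getD (j + 1) ' ')
    by_cases hc : j + 1 < n.toNat ∧ ((pwCw t l j (t.getD (j + 1) ' ') : Int) < k)
    · have hcI : ((j : Int) < n - 1 ∧ cnt.getD (bGet t ((j : Int) + 1)) 0 < k) := by
        refine ⟨by omega, ?_⟩
        rw [hget, hcnt]
        exact hc.2
      simp only [bExtend]
      rw [if_pos hcI, pwE_step t n.toNat k l j hc, hget]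
      have hcast : ((j : Int) + 1) = (((j + 1 : Nat)) : Int) := by push_cast; ring
      rw [hcast]
      apply ih l (j + 1) _ _ (by omega) (by omega)
      intro c
      have hsn := pwCw_snoc t l j c (by omega) (by omega)
      rw [PySem.Dict.getD_insert]
      simp only [pwCw] at hsn
      by_cases hcq : c = t.getD (j + 1) ' '
      · subst hcq
        rw [if_pos rfl, hcnt]
        rw [if_pos rfl] at hsn
        omega
      · rw [if_neg hcq, hinv c]
        rw [if_neg (fun h => hcq h.symm)] at hsn
        omega
    · have hcI : ¬ ((j : Int) < n - 1 ∧ cnt.getD (bGet t ((j : Int) + 1)) 0 < k) := by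
        rintro ⟨h1, h2⟩
        rw [hget, hcnt] at h2
        exact hc ⟨by omega, h2⟩
      simp only [bExtend]
      rw [if_neg hcI, pwE_halt t n.toNat k l j hc]

theorem solution_alt_char (stirng : String) (n k : Int)
    (hlen : n ≤ (stirng.toList.length : Int)) :
    solution_alt stirng n k =
      (List.range n.toNat).foldl (pwStep stirng.toList n.toNat k) (1, 1) := by
  unfold solution_alt
  rw [PySem.List.pyRange_one 0 n]
  rw [List.foldl_map]
  have hn0 : (n - 0).toNat = n.toNat := by omega
  rw [hn0]
  apply PySem.List.foldl_congr_mem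
  intro b l hl
  have hlN : l < n.toNat := List.mem_range.mp hl
  have hlenN : n.toNat ≤ stirng.toList.length := by omega
  have hz : (0 : Int) + (l : Int) = (l : Int) := by ring
  simp only [hz]
  have hbg : bGet stirng.toList (l : Int) = stirng.toList.getD l ' ' := by
    rw [bGet, pwGet_eq stirng.toList _ (by omega)]
    norm_num
  rw [hbg]
  have hInv : pwInv stirng.toList
      (PySem.Dict.insert PySem.Dict.empty (stirng.toList.getD l ' ') 1) l l := by
    intro c
    rw [PySem.Dict.getD_insert, dWin_single stirng.toList l (by omega)]
    by_cases hcq : c = stirng.toList.getD l ' '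
    · subst hcq
      simp
    · rw [if_neg hcq, PySem.Dict.getD_empty]
      have hne : (stirng.toList.getD l ' ' == c) = false :=
        beq_eq_false_iff_ne.mpr (fun h => hcq h.symm)
      rw [List.count_singleton, hne]
      simp
  rw [bExtend_eq_pwE stirng.toList n k hlen n.toNat l l _ hInv le_rfl (by omega)]
  rfl

theorem pwAFold_unfold (t : List Char) (N : Nat) (k : Int) (l : Nat) (b : Int × Int) :
    pwAFold t N k l b =
      if l < pwE t N k l l then
        pwAFold t N k (l + 1) (pwUpd b ((pwE t N k l l : Int) - l + 1) ((l : Int) + 1))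
      else pwUpd b ((pwE t N k l l : Int) - l + 1) ((l : Int) + 1) := by
  rw [pwAFold]
  split_ifs <;> rfl

theorem pwAFold_absorb (t : List Char) (N : Nat) (k : Int) (l r : Nat) (b : Int × Int)
    (hl : l ≤ r) (hr : r ≤ pwE t N k l l) :
    pwAFold t N k l (pwUpd b ((r : Int) - l + 1) ((l : Int) + 1)) = pwAFold t N k l b := by
  conv_lhs => rw [pwAFold_unfold]
  conv_rhs => rw [pwAFold_unfold]
  rw [pwUpd_chain b ((r : Int) - l + 1) ((pwE t N k l l : Int) - l + 1) ((l : Int) + 1) (by omega)]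

theorem aLoop_eq_pwAFold (t : List Char) (n k : Int) (hlen : n ≤ (t.length : Int)) :
    ∀ (fuel : Nat) (l r : Nat) (cnt : PySem.Dict Char Int) (ml al : Int),
      pwInv t cnt l r → l ≤ r → r < n.toNat → r ≤ pwE t n.toNat k l l → 1 ≤ ml →
      2 * n.toNat + 1 ≤ fuel + l + r →
      aLoop t n k fuel (l : Int) (r : Int) cnt ml al = pwAFold t n.toNat k l (ml, al) := by
  intro fuel
  induction fuel using Nat.strong_induction_on with
  | _ fuel ih =>
  intro l r cnt ml al hinv hlr hrN hrE hml hfuel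
  obtain ⟨f, rfl⟩ : ∃ f, fuel = f + 1 := ⟨fuel - 1, by omega⟩
  have hlenN : n.toNat ≤ t.length := by omega
  have hget : aGet t ((r : Int) + 1) = t.getD (r + 1) ' ' := by
    rw [aGet, pwGet_eq t _ (by omega)]
    norm_num
  have hP1 : (if (r : Int) - (l : Int) + 1 > ml then (r : Int) - (l : Int) + 1 else ml) =
      (pwUpd (ml, al) ((r : Int) - (l : Int) + 1) ((l : Int) + 1)).1 := by
    unfold pwUpd; split_ifs <;> rfl
  have hP2 : (if (r : Int) - (l : Int) + 1 > ml then (l : Int) + 1 else al) =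
      (pwUpd (ml, al) ((r : Int) - (l : Int) + 1) ((l : Int) + 1)).2 := by
    unfold pwUpd; split_ifs <;> rfl
  have hP1le : 1 ≤ (pwUpd (ml, al) ((r : Int) - (l : Int) + 1) ((l : Int) + 1)).1 :=
    le_trans hml (pwUpd_fst (ml, al) _ _).1
  simp only [aLoop]
  by_cases hcI : ((r : Int) < n - 1 ∧ cnt.getD (aGet t ((r : Int) + 1)) 0 < k)
  · rw [if_pos hcI]
    have hc : r + 1 < n.toNat ∧ ((pwCw t l r (t.getD (r + 1) ' ') : Int) < k) := by
      refine ⟨by omega, ?_⟩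
      have h2 := hcI.2
      rw [hget, hinv (t.getD (r + 1) ' ')] at h2
      simp only [pwCw]
      exact h2
    have hrE' : r + 1 ≤ pwE t n.toNat k l l := by
      have hag : pwE t n.toNat k l r = pwE t n.toNat k l l := pwE_agree t n.toNat k l l r hlr hrE
      have hst := pwE_step t n.toNat k l r hc
      have hge := pwE_ge t n.toNat k l (r + 1)
      omega
    have hr1N : r + 1 < n.toNat := by
      have := pwE_lt t n.toNat k l l (by omega)
      omega
    have hinv' : pwInv t (cnt.insert (aGet t ((r : Int) + 1)) (cnt.getD (aGet t ((r : Int) + 1)) 0 + 1)) l (r + 1) := by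
      intro c
      rw [hget, PySem.Dict.getD_insert]
      have hsn := pwCw_snoc t l r c (by omega) (by omega)
      simp only [pwCw] at hsn
      by_cases hcq : c = t.getD (r + 1) ' '
      · subst hcq
        rw [if_pos rfl, hinv (t.getD (r + 1) ' ')]
        rw [if_pos rfl] at hsn
        omega
      · rw [if_neg hcq, hinv c]
        rw [if_neg (fun h => hcq h.symm)] at hsn
        omega
    rw [hP1, hP2]
    have hres := ih f (by omega) l (r + 1) _ ((pwUpd (ml, al) ((r : Int) - (l : Int) + 1) ((l : Int) + 1)).1) ((pwUpd (ml, al) ((r : Int) - (l : Int) + 1) ((l : Int) + 1)).2) hinv' (by omega) hr1N hrE' hP1le (by omega)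
    push_cast at hres
    rw [hres, Prod.mk.eta]
    exact pwAFold_absorb t n.toNat k l r (ml, al) hlr hrE
  · rw [if_neg hcI]
    have hcN : ¬ (r + 1 < n.toNat ∧ ((pwCw t l r (t.getD (r + 1) ' ') : Int) < k)) := by
      rintro ⟨h1, h2⟩
      apply hcI
      refine ⟨by omega, ?_⟩
      rw [hget, hinv (t.getD (r + 1) ' ')]
      simp only [pwCw] at h2
      exact h2
    have hEr : pwE t n.toNat k l r = r := pwE_halt t n.toNat k l r hcN
    have hEll : pwE t n.toNat k l l = r := by
      have hag := pwE_agree t n.toNat k l l r hlr hrE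
      omega
    by_cases hlt : (l : Int) < (r : Int)
    · rw [if_pos hlt]
      have hltN : l < r := by omega
      have hgl : aGet t (l : Int) = t.getD l ' ' := by
        rw [aGet, pwGet_eq t _ (by omega)]
        norm_num
      have hinv2 : pwInv t (cnt.insert (aGet t (l : Int)) (cnt.getD (aGet t (l : Int)) 0 - 1)) (l + 1) r := by
        intro c
        rw [hgl, PySem.Dict.getD_insert]
        have hcc := pwCw_cons t l r c (by omega) (by omega)
        simp only [pwCw] at hcc
        by_cases hcq : c = t.getD l ' '
        · subst hcq
          rw [if_pos rfl, hinv (t.getD l ' ')]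
          rw [if_pos rfl] at hcc
          omega
        · rw [if_neg hcq, hinv c]
          rw [if_neg (fun h => hcq h.symm)] at hcc
          omega
      have hrE2 : r ≤ pwE t n.toNat k (l + 1) (l + 1) := by
        have h1 : pwE t n.toNat k l (l + 1) = pwE t n.toNat k l l :=
          pwE_agree t n.toNat k l l (l + 1) (by omega) (by omega)
        have h2 := pwE_mono t n.toNat k l hlenN (l + 1) le_rfl
        omega
      rw [hP1, hP2]
      have hres := ih f (by omega) (l + 1) r _ ((pwUpd (ml, al) ((r : Int) - (l : Int) + 1) ((l : Int) + 1)).1) ((pwUpd (ml, al) ((r : Int) - (l : Int) + 1) ((l : Int) + 1)).2) hinv2 (by omega) hrN hrE2 hP1le (by omega)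
      push_cast at hres
      rw [hres, Prod.mk.eta]
      conv_rhs => rw [pwAFold_unfold]
      rw [hEll, if_pos hltN]
    · rw [if_neg hlt]
      have hlr' : l = r := by omega
      subst hlr'
      conv_rhs => rw [pwAFold_unfold]
      rw [hEll, if_neg (lt_irrefl l)]
      rw [show ((l : Int) - (l : Int) + 1) = 1 by ring]
      rw [pwUpd_noop (ml, al) 1 ((l : Int) + 1) hml]
      rw [if_neg (by omega : ¬ ((1 : Int) > ml))]
      rw [if_neg (by omega : ¬ ((1 : Int) > ml))]

theorem pwNodup_of_traj (t : List Char) (N : Nat) (hlen : N ≤ t.length) (i : Nat) (hi : i < N) :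
    ∀ j, i ≤ j → j ≤ pwE t N 1 i i → (dWin t i j).Nodup := by
  intro j
  induction j with
  | zero =>
    intro h1 _
    have h0 : i = 0 := by omega
    subst h0
    rw [dWin_single t 0 (by omega)]
    simp
  | succ j' ih =>
    intro h1 h2
    by_cases hij : i = j' + 1
    · rw [show j' + 1 = i from hij.symm, dWin_single t i (by omega)]
      simp
    · have hij' : i ≤ j' := by omega
      have hnd := ih hij' (by omega)
      have hagree : pwE t N 1 i j' = pwE t N 1 i i := pwE_agree t N 1 i i j' hij' (by omega)
      by_cases hc : j' + 1 < N ∧ ((pwCw t i j' (t.getD (j' + 1) ' ') : Int) < 1)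
      · have hcw : pwCw t i j' (t.getD (j' + 1) ' ') = 0 := by
          have := hc.2; omega
        have hmem : t.getD (j' + 1) ' ' ∉ dWin t i j' := by
          simp only [pwCw] at hcw
          exact List.count_eq_zero.mp hcw
        rw [dWin_snoc t i j' (by omega) (by omega)]
        rw [List.nodup_append]
        refine ⟨hnd, by simp, ?_⟩
        intro a ha b hb
        rw [List.mem_singleton] at hb
        subst hb
        exact fun he => hmem (he ▸ ha)
      · exfalso
        have := pwE_halt t N 1 i j' hc
        omega

theorem pwE_reach (t : List Char) (N : Nat) (hlen : N ≤ t.length) (l r : Nat)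
    (hr : r < N) (hnd : (dWin t l r).Nodup) (j : Nat) (hj1 : l ≤ j) (hj2 : j ≤ r) :
    r ≤ pwE t N 1 l j := by
  by_cases hjr : j = r
  · subst hjr
    exact pwE_ge t N 1 l j
  · have hjr' : j < r := by omega
    have hpre : dWin t l (j + 1) = (dWin t l r).take (j + 2 - l) := by
      rw [dWin, dWin, List.take_take]
      congr 1
      omega
    have hnd2 : (dWin t l (j + 1)).Nodup := by
      rw [hpre]
      exact List.Nodup.sublist (List.take_sublist _ _) hnd
    have hsn := dWin_snoc t l j (by omega) (by omega)
    have hmem : t.getD (j + 1) ' ' ∉ dWin t l j := by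
      rw [hsn] at hnd2
      have hd := (List.nodup_append.mp hnd2).2.2
      exact fun hm => hd _ hm _ (List.mem_singleton_self _) rfl
    have hcw : pwCw t l j (t.getD (j + 1) ' ') = 0 := by
      simp only [pwCw]
      exact List.count_eq_zero.mpr hmem
    have hc : j + 1 < N ∧ ((pwCw t l j (t.getD (j + 1) ' ') : Int) < 1) :=
      ⟨by omega, by rw [hcw]; norm_num⟩
    rw [pwE_step t N 1 l j hc]
    exact pwE_reach t N hlen l r hr hnd (j + 1) (by omega) (by omega)
termination_by r - j
decreasing_by omega

theorem pwE_of_nodup (t : List Char) (N : Nat) (hlen : N ≤ t.length) (l r : Nat)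
    (hl : l ≤ r) (hr : r < N) (hnd : (dWin t l r).Nodup) : r ≤ pwE t N 1 l l :=
  pwE_reach t N hlen l r hr hnd l le_rfl hl

theorem pwFold_noop (t : List Char) (N : Nat) (k : Int) (xs : List Nat) (b : Int × Int)
    (h : ∀ i ∈ xs, pwLen t N k i ≤ b.1) : xs.foldl (pwStep t N k) b = b := by
  induction xs with
  | nil => rfl
  | cons x xs ih =>
    rw [List.foldl_cons]
    have hx : pwStep t N k b x = b := pwUpd_noop b _ _ (h x (by simp))
    rw [hx]
    exact ih (fun i hi => h i (by simp [hi]))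

theorem pwAFold_eq_fold (stirng : String) (n k : Int)
    (hlen : n.toNat ≤ stirng.toList.length) (hND : ¬ D_solution stirng n k)
    (l : Nat) (b : Int × Int) (hl : l < n.toNat) (hb : 1 ≤ b.1)
    (hbound : ∀ i, i < l → pwLen stirng.toList n.toNat k i ≤ b.1)
    (hpath : ∀ i, i < l → i < pwE stirng.toList n.toNat k i i) :
    pwAFold stirng.toList n.toNat k l b =
      (List.range' l (n.toNat - l)).foldl (pwStep stirng.toList n.toNat k) b := by
  have hrange : List.range' l (n.toNat - l) = l :: List.range' (l + 1) (n.toNat - l - 1) := by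
    rw [show n.toNat - l = (n.toNat - l - 1) + 1 by omega, List.range'_succ]
    congr 2
  rw [hrange, List.foldl_cons]
  conv_lhs => rw [pwAFold_unfold]
  have hstep : pwStep stirng.toList n.toNat k b l =
      pwUpd b ((pwE stirng.toList n.toNat k l l : Int) - l + 1) ((l : Int) + 1) := rfl
  have hb1 : 1 ≤ (pwStep stirng.toList n.toNat k b l).1 := le_trans hb (pwUpd_fst b _ _).1
  by_cases hle : l < pwE stirng.toList n.toNat k l l
  · rw [if_pos hle, ← hstep]
    have heN : pwE stirng.toList n.toNat k l l < n.toNat := pwE_lt _ _ _ _ _ hl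
    refine pwAFold_eq_fold stirng n k hlen hND (l + 1) _ (by omega) hb1 ?_ ?_
    · intro i hi
      rcases Nat.lt_or_ge i l with hc1 | hc2
      · exact le_trans (hbound i hc1) (pwUpd_fst b _ _).1
      · have hieq : i = l := by omega
        rw [hieq]
        exact (pwUpd_fst b _ _).2
    · intro i hi
      rcases Nat.lt_or_ge i l with hc1 | hc2
      · exact hpath i hc1
      · have hieq : i = l := by omega
        rw [hieq]
        exact hle
  · rw [if_neg hle, ← hstep]
    have hge := pwE_ge stirng.toList n.toNat k l l
    have he : pwE stirng.toList n.toNat k l l = l := by omega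
    refine (pwFold_noop stirng.toList n.toNat k _ _ ?_).symm
    intro i hi
    have hiN : l + 1 ≤ i ∧ i < n.toNat := by
      have := List.mem_range'_1.mp hi
      omega
    by_cases hk0 : k ≤ 0
    · have hEi : pwE stirng.toList n.toNat k i i = i := by
        apply pwE_halt
        rintro ⟨-, hcc⟩
        have h0 : (0 : Int) ≤ ((pwCw stirng.toList i i (stirng.toList.getD (i + 1) ' ') : Int)) := by positivity
        omega
      have h1 : pwLen stirng.toList n.toNat k i = 1 := by
        rw [pwLen, hEi]
        ring
      rw [h1]
      exact hb1
    · have hstuckc : ¬ (l + 1 < n.toNat ∧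
          ((pwCw stirng.toList l l (stirng.toList.getD (l + 1) ' ') : Int) < k)) := by
        intro hcc
        have h1 := pwE_step stirng.toList n.toNat k l l hcc
        have h2 := pwE_ge stirng.toList n.toNat k l (l + 1)
        omega
      have hlN1 : l + 1 < n.toNat := by omega
      have hcw1 : ¬ ((pwCw stirng.toList l l (stirng.toList.getD (l + 1) ' ') : Int) < k) :=
        fun hcc => hstuckc ⟨hlN1, hcc⟩
      have hsingle := pwCw_single stirng.toList l (stirng.toList.getD (l + 1) ' ') (by omega)
      by_cases hk1 : k = 1
      · subst hk1
        have hdup : stirng.toList.getD l ' ' = stirng.toList.getD (l + 1) ' ' := by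
          by_contra hne
          apply hcw1
          rw [hsingle, if_neg hne]
          norm_num
        have hNoWin : ∀ lw, lw < n.toNat → ∀ rw, rw < n.toNat → l < lw → lw ≤ rw →
            (dWin stirng.toList lw rw).Nodup →
            ∃ l', l' ≤ l ∧ ∃ r', r' < n.toNat ∧ l' ≤ r' ∧ (dWin stirng.toList l' r').Nodup ∧
              rw + 1 - lw ≤ r' + 1 - l' := by
          intro lw hlw rw hrw hllw hlwrw hnd
          by_contra hno
          push_neg at hno
          apply hND
          refine ⟨rfl, lw, rw, ⟨hlwrw, hrw, hnd⟩, ?_⟩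
          rintro l' r' ⟨hlr', hr', hnd'⟩ hfirst'
          have hl'le : l' ≤ l := by
            by_contra hgt
            exact hfirst' l (by omega) hdup
          have := hno l' hl'le r' hr' hlr' hnd'
          omega
        have hiE := pwE_ge stirng.toList n.toNat 1 i i
        have hEiN : pwE stirng.toList n.toNat 1 i i < n.toNat := pwE_lt _ _ _ _ i hiN.2
        have hndW := pwNodup_of_traj stirng.toList n.toNat hlen i hiN.2
          (pwE stirng.toList n.toNat 1 i i) hiE le_rfl
        obtain ⟨l', hl'le, r', hr'N, hl'r', hnd', hlen'⟩ :=
          hNoWin i hiN.2 (pwE stirng.toList n.toNat 1 i i) hEiN (by omega) hiE hndW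
        have hr'E : r' ≤ pwE stirng.toList n.toNat 1 l' l' :=
          pwE_of_nodup stirng.toList n.toNat hlen l' r' hl'r' hr'N hnd'
        have hLl' : pwLen stirng.toList n.toNat 1 l' ≤ (pwStep stirng.toList n.toNat 1 b l).1 := by
          rcases Nat.lt_or_ge l' l with hc1 | hc2
          · exact le_trans (hbound l' hc1) (pwUpd_fst b _ _).1
          · have hleq : l' = l := by omega
            rw [hleq]
            exact (pwUpd_fst b _ _).2
        have hil : pwLen stirng.toList n.toNat 1 i ≤ pwLen stirng.toList n.toNat 1 l' := by
          rw [pwLen, pwLen]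
          omega
        exact le_trans hil hLl'
      · exfalso
        apply hcw1
        rw [hsingle]
        split_ifs <;> omega
termination_by n.toNat - l
decreasing_by omega


theorem pwUpd_fst_cases (b : Int × Int) (len pos : Int) :
    (pwUpd b len pos).1 = len ∨ (pwUpd b len pos).1 = b.1 := by
  unfold pwUpd; split_ifs <;> simp

theorem pwFold_fst_mono (t : List Char) (N : Nat) (k : Int) (xs : List Nat) (b : Int × Int) :
    b.1 ≤ (xs.foldl (pwStep t N k) b).1 := by
  induction xs generalizing b with
  | nil => exact le_rfl
  | cons x xs ih =>
    rw [List.foldl_cons]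
    exact le_trans (pwUpd_fst b _ _).1 (ih _)

theorem pwFold_fst_ge (t : List Char) (N : Nat) (k : Int) (xs : List Nat) (b : Int × Int)
    (i : Nat) (hi : i ∈ xs) : pwLen t N k i ≤ (xs.foldl (pwStep t N k) b).1 := by
  induction xs generalizing b with
  | nil => cases hi
  | cons x xs ih =>
    rw [List.foldl_cons]
    rcases List.mem_cons.mp hi with he | hm
    · subst he
      exact le_trans (pwUpd_fst b _ _).2 (pwFold_fst_mono t N k xs _)
    · exact ih _ hm

theorem solution_char (stirng : String) (n k : Int) (hne : stirng.toList ≠ [])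
    (hlen : n ≤ (stirng.toList.length : Int)) (hn : 0 < n) :
    solution stirng n k = pwAFold stirng.toList n.toNat k 0 (1, 1) := by
  have h0len : 0 < stirng.toList.length := by omega
  have hget0 : aGet stirng.toList 0 = stirng.toList.getD 0 ' ' := by
    rw [aGet, pwGet_eq _ _ le_rfl]
    norm_num
  have hinv0 : pwInv stirng.toList
      (PySem.Dict.insert PySem.Dict.empty (aGet stirng.toList 0) 1) 0 0 := by
    intro c
    rw [hget0, PySem.Dict.getD_insert, dWin_single stirng.toList 0 h0len]
    by_cases hcq : c = stirng.toList.getD 0 ' '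
    · subst hcq
      simp
    · rw [if_neg hcq, PySem.Dict.getD_empty]
      have hne2 : (stirng.toList.getD 0 ' ' == c) = false :=
        beq_eq_false_iff_ne.mpr (fun h => hcq h.symm)
      rw [List.count_singleton, hne2]
      simp
  have hA := aLoop_eq_pwAFold stirng.toList n k hlen (2 * n.toNat + 2) 0 0 _ 1 1 hinv0
    le_rfl (by omega) (Nat.zero_le _) le_rfl (by omega)
  norm_num at hA
  unfold solution
  exact hA

theorem pwAFold_bound (stirng : String) (n M : Int)
    (hlen : n.toNat ≤ stirng.toList.length)
    (hM : ∀ i, i < n.toNat → (∀ q < i, ¬ dDup stirng q) →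
      pwLen stirng.toList n.toNat 1 i < M)
    (l0 : Nat) (b : Int × Int) (hl0 : l0 < n.toNat)
    (hfree : ∀ q < l0, ¬ dDup stirng q) (hb : b.1 < M) :
    (pwAFold stirng.toList n.toNat 1 l0 b).1 < M := by
  rw [pwAFold_unfold]
  have hbM : (pwUpd b ((pwE stirng.toList n.toNat 1 l0 l0 : Int) - l0 + 1) ((l0 : Int) + 1)).1 < M := by
    rcases pwUpd_fst_cases b ((pwE stirng.toList n.toNat 1 l0 l0 : Int) - l0 + 1) ((l0 : Int) + 1)
      with h | h <;> rw [h]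
    · exact hM l0 hl0 hfree
    · exact hb
  by_cases hle : l0 < pwE stirng.toList n.toNat 1 l0 l0
  · rw [if_pos hle]
    have heN := pwE_lt stirng.toList n.toNat 1 l0 l0 hl0
    have hfree' : ∀ q < l0 + 1, ¬ dDup stirng q := by
      intro q hq
      rcases Nat.lt_or_ge q l0 with h1 | h2
      · exact hfree q h1
      · have hq0 : q = l0 := by omega
        rw [hq0]
        by_cases hc : l0 + 1 < n.toNat ∧
            ((pwCw stirng.toList l0 l0 (stirng.toList.getD (l0 + 1) ' ') : Int) < 1)
        · intro hdupq
          have hs := pwCw_single stirng.toList l0 (stirng.toList.getD (l0 + 1) ' ') (by omega)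
          have h2' := hc.2
          unfold dDup at hdupq
          rw [hs, if_pos hdupq] at h2'
          norm_num at h2'
        · exfalso
          have := pwE_halt stirng.toList n.toNat 1 l0 l0 hc
          omega
    exact pwAFold_bound stirng n M hlen hM (l0 + 1) _ (by omega) hfree' hbM
  · rw [if_neg hle]
    exact hbM
termination_by n.toNat - l0
decreasing_by omega

-- ===== VERDICT (by name: the statement is the Claim_ definition above) =====
theorem solution_spec : Claim_unchanged_solution := by
  intro stirng n k hdom hpre hND
  obtain ⟨hne, hlen⟩ := hpre
  by_cases hn0 : n ≤ 0
  · have hn : n ≤ 0 := hn0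
    have hN0 : n.toNat = 0 := by omega
    have hA : solution stirng n k = (1, 1) := by
      unfold solution
      rw [show 2 * n.toNat + 2 = 1 + 1 from by omega]
      simp only [aLoop]
      rw [if_neg (fun h => absurd h.1 (by omega : ¬ (0 : Int) < n - 1))]
      rw [if_neg (by omega : ¬ (0 : Int) < 0)]
      norm_num
    have hB : solution_alt stirng n k = (1, 1) := by
      rw [solution_alt_char stirng n k hlen, hN0]
      simp
    rw [hA, hB]
  · have hn : 0 < n := by omega
    have hlenN : n.toNat ≤ stirng.toList.length := by omega
    have hfold := pwAFold_eq_fold stirng n k hlenN hND 0 (1, 1) (by omega) le_rfl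
      (fun i hi => absurd hi (Nat.not_lt_zero i)) (fun i hi => absurd hi (Nat.not_lt_zero i))
    rw [solution_char stirng n k hne hlen hn, solution_alt_char stirng n k hlen, hfold]
    simp [List.range_eq_range']
theorem solution_changed : Claim_changed_solution := by unfold Claim_changed_solution; decide

theorem solution_tight : Claim_exact_solution := by
  intro s n k hdom hpre hD
  unfold D_solution dOk at hD
  obtain ⟨hk, l, r, ⟨hlr, hrN, hnd⟩, hall⟩ := hD
  subst hk
  obtain ⟨hne, hlen⟩ := hpre
  have hn : 0 < n := by omega
  have hlenN : n.toNat ≤ s.toList.length := by omega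
  have h0len : 0 < s.toList.length := by omega
  have hndW : (dWin s.toList l r).Nodup := hnd
  have hnd0 : ((s.toList.drop 0).take (0 + 1 - 0)).Nodup := by
    rw [show ((s.toList.drop 0).take (0 + 1 - 0)) = dWin s.toList 0 0 from rfl,
      dWin_single s.toList 0 h0len]
    exact List.nodup_singleton _
  have hrl : 0 < r - l := by
    have h00 := hall 0 0 ⟨le_rfl, by omega, hnd0⟩ (fun q hq => absurd hq (Nat.not_lt_zero q))
    omega
  have hrE : r ≤ pwE s.toList n.toNat 1 l l := pwE_of_nodup s.toList n.toNat hlenN l r hlr hrN hndW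
  have hBge : ((r : Int) - l + 1) ≤ (solution_alt s n 1).1 := by
    rw [solution_alt_char s n 1 hlen]
    have h1 := pwFold_fst_ge s.toList n.toNat 1 (List.range n.toNat) (1, 1) l
      (List.mem_range.mpr (by omega))
    have h2 : ((r : Int) - l + 1) ≤ pwLen s.toList n.toNat 1 l := by
      rw [pwLen]
      omega
    exact le_trans h2 h1
  have hAlt : (solution s n 1).1 < (r : Int) - l + 1 := by
    rw [solution_char s n 1 hne hlen hn]
    refine pwAFold_bound s n ((r : Int) - l + 1) hlenN ?_ 0 (1, 1) (by omega)
      (fun q hq => absurd hq (Nat.not_lt_zero q)) (by omega)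
    intro i hi hfreei
    have hiE := pwE_ge s.toList n.toNat 1 i i
    have hEiN := pwE_lt s.toList n.toNat 1 i i hi
    have hndi : ((s.toList.drop i).take (pwE s.toList n.toNat 1 i i + 1 - i)).Nodup :=
      pwNodup_of_traj s.toList n.toNat hlenN i hi (pwE s.toList n.toNat 1 i i) hiE le_rfl
    have hlt := hall i (pwE s.toList n.toNat 1 i i) ⟨hiE, hEiN, hndi⟩ hfreei
    rw [pwLen]
    omega
  intro heq
  rw [heq] at hAlt
  omega
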